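-- pv_equiv track=rewrite | github.com/Sulliwen/Master | Projet_CB/src/modeles/M3_bis.py | pre_trait_M
-- ===== SOURCE A (Python) =====
-- def pre_trait_M(n, A, k):
--     # création du distancier booleen
--     M_dist = [[False for i in range(n)] for j in range(n)]
--     for i in range(1,n+1):
--         for j in range(1,n+1):
--             if (min(abs(i-j), n - abs(i-j))) <= k:
--                 M_dist[i-1][j-1] = True
--
--     # creation de la matrice booleenne des arretes
--     M_edges = [[False for i in range(n)] for j in range(n)]
--     for a in A:
--         s1 = a[0]-1
--         s2 = a[1]-1
--         M_edges[s1][s2] = True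
--         M_edges[s2][s1] = True
--
--     return M_edges, M_dist
-- ===== SOURCE B (Python) =====
-- def pre_trait_M(n, A, k):
--     # circular band: mark only the offsets within distance min(k, n//2) of each row
--     M_dist = [[False] * n for _ in range(n)]
--     kk = min(k, n // 2)
--     for i in range(n):
--         for off in range(-kk, kk + 1):
--             M_dist[i][(i + off) % n] = True
--
--     M_edges = [[False] * n for _ in range(n)]
--     for a, b in A:
--         M_edges[a - 1][b - 1] = True
--         M_edges[b - 1][a - 1] = True
--
--     return M_edges, M_dist
-- ===== Notes on version B (the rewrite author's own statement) =====
-- stated objective: alternative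
-- what changed: M_dist is built by marking, for each row i, only the circular band of cells at offsets within min(k, n//2), instead of testing the min(|i-j|, n-|i-j|) <= k formula on every (i,j) pair; M_edges is built as in A.
import Mathlib
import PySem

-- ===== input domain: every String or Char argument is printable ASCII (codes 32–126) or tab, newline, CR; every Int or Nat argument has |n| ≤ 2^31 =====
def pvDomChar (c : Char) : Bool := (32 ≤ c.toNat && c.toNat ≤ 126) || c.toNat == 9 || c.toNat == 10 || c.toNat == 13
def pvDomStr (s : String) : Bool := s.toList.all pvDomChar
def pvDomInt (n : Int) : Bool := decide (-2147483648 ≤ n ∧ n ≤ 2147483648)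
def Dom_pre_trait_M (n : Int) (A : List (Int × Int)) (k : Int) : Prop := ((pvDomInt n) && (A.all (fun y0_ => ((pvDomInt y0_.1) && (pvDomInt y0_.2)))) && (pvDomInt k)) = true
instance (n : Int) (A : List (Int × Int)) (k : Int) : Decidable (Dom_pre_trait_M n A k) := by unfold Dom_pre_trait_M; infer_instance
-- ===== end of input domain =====

-- B builds M_dist by marking, per row, only the circular band of offsets within min(k, n//2),
-- instead of testing min(|i-j|, n-|i-j|) <= k on every (i,j) pair; M_edges is built as in A.

-- Python's `row[j] = True` on a list (negative index wraps; out of range raises, which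
-- Pre_ excludes — the port is a no-op there).
def pySet1 (row : List Bool) (j : Int) : List Bool :=
  let jj := if j < 0 then j + row.length else j
  if 0 ≤ jj ∧ jj < (row.length : Int) then row.set jj.toNat true else row

-- Python's `M[i][j] = True` on a list-of-lists with non-aliased rows.
def pySet2 (M : List (List Bool)) (i j : Int) : List (List Bool) :=
  let ii := if i < 0 then i + M.length else i
  if 0 ≤ ii ∧ ii < (M.length : Int) then M.modify ii.toNat (fun row => pySet1 row j) else M

-- ===== PORT A =====
def pre_trait_M (n : Int) (A : List (Int × Int)) (k : Int) : List (List Bool) × List (List Bool) :=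
  let M_dist0 := (PySem.List.pyRange 0 n 1).map (fun _ => (PySem.List.pyRange 0 n 1).map (fun _ => false))
  let M_dist := (PySem.List.pyRange 1 (n+1) 1).foldl (fun M i =>
    (PySem.List.pyRange 1 (n+1) 1).foldl (fun M j =>
      if min |i - j| (n - |i - j|) ≤ k then pySet2 M (i-1) (j-1) else M) M) M_dist0
  let M_edges0 := (PySem.List.pyRange 0 n 1).map (fun _ => (PySem.List.pyRange 0 n 1).map (fun _ => false))
  let M_edges := A.foldl (fun M a =>
    let s1 := a.1 - 1
    let s2 := a.2 - 1
    pySet2 (pySet2 M s1 s2) s2 s1) M_edges0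
  (M_edges, M_dist)

-- ===== PORT B =====
def pre_trait_M_alt (n : Int) (A : List (Int × Int)) (k : Int) : List (List Bool) × List (List Bool) :=
  let M_dist0 := List.replicate n.toNat (List.replicate n.toNat false)
  let kk := min k (PySem.Int.floordiv n 2)
  let M_dist := (PySem.List.pyRange 0 n 1).foldl (fun M i =>
    (PySem.List.pyRange (-kk) (kk+1) 1).foldl (fun M off =>
      pySet2 M i (PySem.Int.mod (i + off) n)) M) M_dist0
  let M_edges := A.foldl (fun M p =>
    pySet2 (pySet2 M (p.1 - 1) (p.2 - 1)) (p.2 - 1) (p.1 - 1))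
    (List.replicate n.toNat (List.replicate n.toNat false))
  (M_edges, M_dist)

-- ===== PRECONDITION & SPEC =====
-- Pre_ excludes exactly the inputs on which Python A raises IndexError: an edge endpoint
-- outside [1-n, n] indexes out of range (endpoints in [1-n, 0] wrap, which both programs do alike).
def Pre_pre_trait_M (n : Int) (A : List (Int × Int)) (k : Int) : Prop :=
  ∀ p ∈ A, (1 - n ≤ p.1 ∧ p.1 ≤ n) ∧ (1 - n ≤ p.2 ∧ p.2 ≤ n)
instance (n : Int) (A : List (Int × Int)) (k : Int) : Decidable (Pre_pre_trait_M n A k) := by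
  unfold Pre_pre_trait_M; infer_instance

def pvWitness_pre_trait_M : Int × (List (Int × Int)) × Int := (3, [(1, 2), (3, 1)], 1)

def Spec_pre_trait_M (n : Int) (A : List (Int × Int)) (k : Int) (out : List (List Bool) × List (List Bool)) : Prop := out = pre_trait_M_alt n A k
instance (n : Int) (A : List (Int × Int)) (k : Int) (out : List (List Bool) × List (List Bool)) : Decidable (Spec_pre_trait_M n A k out) := by unfold Spec_pre_trait_M; infer_instance

-- ===== CLAIM (what is proved, stated in full; the proofs are below) =====
def Claim_equal_pre_trait_M : Prop := ∀ (n : Int) (A : List (Int × Int)) (k : Int), Dom_pre_trait_M n A k → Pre_pre_trait_M n A k → Spec_pre_trait_M n A k (pre_trait_M n A k)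

-- ===== LEMMAS AND PROOFS =====

-- rectangular N×N shape
def RectN (N : Nat) (M : List (List Bool)) : Prop :=
  M.length = N ∧ ∀ (i : Nat) (h : i < M.length), M[i].length = N

-- entry read with defaults (only used in range on rectangular matrices)
def get2 (M : List (List Bool)) (i j : Nat) : Bool := (M.getD i []).getD j false

lemma rect_replicate (N : Nat) : RectN N (List.replicate N (List.replicate N false)) := by
  refine ⟨by simp, ?_⟩
  intro i h; simp

lemma get2_replicate (N i j : Nat) : get2 (List.replicate N (List.replicate N false)) i j = false := by
  unfold get2
  by_cases h : i < N <;> by_cases h2 : j < N <;>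
    simp [List.getD_eq_getElem?_getD, List.getElem?_replicate, h, h2]

lemma rect_modify_set (N : Nat) (M : List (List Bool)) (p q : Nat)
    (h : RectN N M) : RectN N (M.modify p (fun r => r.set q true)) := by
  obtain ⟨h1, h2⟩ := h
  refine ⟨by simpa using h1, ?_⟩
  intro i hi
  rw [List.getElem_modify]
  split
  · simpa using h2 i (by simpa using hi)
  · exact h2 i (by simpa using hi)

lemma get2_modify_set (N : Nat) (M : List (List Bool)) (p q : Nat)
    (h : RectN N M) (hp : p < N) (hq : q < N) (i j : Nat) :
    get2 (M.modify p (fun r => r.set q true)) i j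
      = (((p == i) && (q == j)) || get2 M i j) := by
  obtain ⟨h1, h2⟩ := h
  unfold get2
  by_cases hpi : p = i
  · subst hpi
    have hplen : p < M.length := h1 ▸ hp
    have hql : q < (M[p]).length := by rw [h2 p hplen]; exact hq
    have hbeq : (p == p) = true := beq_self_eq_true p
    simp only [List.getD_eq_getElem?_getD, List.getElem?_modify,
      List.getElem?_eq_getElem hplen, hbeq, Bool.true_and]
    by_cases hqj : q = j
    · subst hqj
      simp [List.getElem?_set, hql]
    · have : (q == j) = false := beq_eq_false_iff_ne.mpr hqj
      simp [List.getElem?_set, hqj, this]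
  · have hbeq : (p == i) = false := beq_eq_false_iff_ne.mpr hpi
    have hgm : (M.modify p (fun r => r.set q true))[i]? = M[i]? := by
      rw [List.getElem?_modify]
      by_cases hil : i < M.length
      · simp [List.getElem?_eq_getElem hil, hpi]
      · simp [List.getElem?_eq_none (Nat.le_of_not_lt hil)]
    simp [List.getD_eq_getElem?_getD, hgm, hbeq]

-- one pass of conditional single-cell updates
lemma get2_foldl {α : Type} (N : Nat) (L : List α)
    (f : List (List Bool) → α → List (List Bool))
    (g : α → Bool) (p q : α → Nat)
    (hf : ∀ (M : List (List Bool)) (x : α), RectN N M → x ∈ L →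
      f M x = if g x then M.modify (p x) (fun r => r.set (q x) true) else M)
    (hpq : ∀ x ∈ L, g x = true → p x < N ∧ q x < N) :
    ∀ M, RectN N M →
      RectN N (L.foldl f M) ∧
      ∀ i j, get2 (L.foldl f M) i j
        = ((L.any (fun x => g x && (p x == i) && (q x == j))) || get2 M i j) := by
  induction L with
  | nil => intro M hM; exact ⟨hM, by simp⟩
  | cons x L ih =>
    intro M hM
    have hfx := hf M x hM List.mem_cons_self
    have step : RectN N (f M x) := by
      rw [hfx]; split
      · exact rect_modify_set N M _ _ hM
      · exact hM
    have ih' := ih (fun M y hM hy => hf M y hM (List.mem_cons_of_mem _ hy))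
      (fun y hy => hpq y (List.mem_cons_of_mem _ hy)) (f M x) step
    refine ⟨by simpa using ih'.1, ?_⟩
    intro i j
    have hrec := ih'.2 i j
    simp only [List.foldl_cons] at *
    rw [hrec]
    by_cases hg : g x = true
    · obtain ⟨hp, hq⟩ := hpq x List.mem_cons_self hg
      rw [hfx, if_pos hg, get2_modify_set N M _ _ hM hp hq]
      simp [hg, Bool.or_assoc, Bool.or_comm, Bool.or_left_comm]
    · rw [hfx, if_neg hg]
      simp [Bool.eq_false_iff.mpr hg, Bool.or_assoc]

-- the nested (two-loop) version
lemma get2_foldl2 {α β : Type} (N : Nat) (L1 : List α) (L2 : List β)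
    (f : List (List Bool) → α → β → List (List Bool))
    (g : α → β → Bool) (p q : α → β → Nat)
    (hf : ∀ (M : List (List Bool)) (a : α) (b : β), RectN N M → a ∈ L1 → b ∈ L2 →
      f M a b = if g a b then M.modify (p a b) (fun r => r.set (q a b) true) else M)
    (hpq : ∀ a ∈ L1, ∀ b ∈ L2, g a b = true → p a b < N ∧ q a b < N) :
    ∀ M, RectN N M →
      RectN N (L1.foldl (fun M a => L2.foldl (fun M b => f M a b) M) M) ∧
      ∀ i j, get2 (L1.foldl (fun M a => L2.foldl (fun M b => f M a b) M) M) i j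
        = ((L1.any (fun a => L2.any (fun b => g a b && (p a b == i) && (q a b == j)))) || get2 M i j) := by
  induction L1 with
  | nil => intro M hM; exact ⟨hM, by simp⟩
  | cons a L1 ih =>
    intro M hM
    have inner := get2_foldl N L2 (fun M b => f M a b) (g a) (p a) (q a)
      (fun M b hM hb => hf M a b hM List.mem_cons_self hb)
      (fun b hb => hpq a List.mem_cons_self b hb) M hM
    have ih' := ih (fun M a' b hM ha hb => hf M a' b hM (List.mem_cons_of_mem _ ha) hb)
      (fun a' ha => hpq a' (List.mem_cons_of_mem _ ha)) _ inner.1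
    refine ⟨by simpa using ih'.1, ?_⟩
    intro i j
    simp only [List.foldl_cons]
    rw [ih'.2 i j, inner.2 i j]
    simp [Bool.or_assoc, Bool.or_comm, Bool.or_left_comm]

lemma matrix_ext (N : Nat) (M1 M2 : List (List Bool))
    (h1 : RectN N M1) (h2 : RectN N M2)
    (h : ∀ i j, i < N → j < N → get2 M1 i j = get2 M2 i j) : M1 = M2 := by
  obtain ⟨l1, r1⟩ := h1
  obtain ⟨l2, r2⟩ := h2
  apply List.ext_getElem (by rw [l1, l2])
  intro i hi1 hi2
  apply List.ext_getElem (by rw [r1 i hi1, r2 i hi2])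
  intro j hj1 hj2
  have hiN : i < N := l1 ▸ hi1
  have hjN : j < N := (r1 i hi1) ▸ hj1
  have hg := h i j hiN hjN
  unfold get2 at hg
  simp only [List.getD_eq_getElem?_getD, List.getElem?_eq_getElem hi1,
    List.getElem?_eq_getElem hi2, Option.getD_some,
    List.getElem?_eq_getElem hj1, List.getElem?_eq_getElem hj2] at hg
  exact hg

lemma map_const_len {α β : Type} (l : List α) (b : β) :
    l.map (fun _ => b) = List.replicate l.length b := by
  induction l with
  | nil => rfl
  | cons x l ih => simp [ih, List.replicate_succ]

lemma map_const_false (n : Int) :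
    (PySem.List.pyRange 0 n 1).map (fun _ => false) = List.replicate n.toNat false := by
  rw [map_const_len, PySem.List.length_pyRange_one]
  simp

lemma init_eq (n : Int) :
    (PySem.List.pyRange 0 n 1).map (fun _ => (PySem.List.pyRange 0 n 1).map (fun _ => false))
      = List.replicate n.toNat (List.replicate n.toNat false) := by
  simp only [map_const_false]
  rw [map_const_len, PySem.List.length_pyRange_one]
  simp

lemma modify_congr_at {α : Type} (M : List α) (p : Nat) (f g : α → α)
    (h : ∀ (hp : p < M.length), f (M[p]) = g (M[p])) : M.modify p f = M.modify p g := by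
  apply List.ext_getElem?
  intro i
  rw [List.getElem?_modify, List.getElem?_modify]
  by_cases hpi : p = i
  · subst hpi
    by_cases hp : p < M.length
    · simp [List.getElem?_eq_getElem hp, h hp]
    · simp [List.getElem?_eq_none (Nat.le_of_not_lt hp)]
  · simp [hpi]

-- pySet2 with in-range nonnegative indices is modify/set
lemma pySet2_eq (N : Nat) (M : List (List Bool)) (p q : Int)
    (hM : RectN N M) (hp0 : 0 ≤ p) (hpN : p < (N : Int)) (hq0 : 0 ≤ q) (hqN : q < (N : Int)) :
    pySet2 M p q = M.modify p.toNat (fun r => r.set q.toNat true) := by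
  obtain ⟨h1, h2⟩ := hM
  have hlen : (M.length : Int) = (N : Int) := by omega
  show (let ii := if p < 0 then p + M.length else p;
    if 0 ≤ ii ∧ ii < (M.length : Int) then M.modify ii.toNat (fun row => pySet1 row q) else M)
      = M.modify p.toNat (fun r => r.set q.toNat true)
  rw [show (if p < 0 then p + (M.length : Int) else p) = p from if_neg (by omega)]
  rw [if_pos (show 0 ≤ p ∧ p < (M.length : Int) by omega)]
  apply modify_congr_at
  intro hp
  have hrl : (M[p.toNat]).length = N := h2 p.toNat hp
  show (let jj := if q < 0 then q + (M[p.toNat]).length else q;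
    if 0 ≤ jj ∧ jj < ((M[p.toNat]).length : Int) then (M[p.toNat]).set jj.toNat true else M[p.toNat])
      = (M[p.toNat]).set q.toNat true
  rw [show (if q < 0 then q + ((M[p.toNat]).length : Int) else q) = q from if_neg (by omega)]
  rw [if_pos (show 0 ≤ q ∧ q < ((M[p.toNat]).length : Int) by rw [hrl]; omega)]

-- the arithmetic core: offset-band membership ≡ the min-distance test
lemma band_iff (n k : Int) (i j : Nat) (hi : i < n.toNat) (hj : j < n.toNat) :
    (∃ off : Int, -(min k (PySem.Int.floordiv n 2)) ≤ off ∧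
        off < min k (PySem.Int.floordiv n 2) + 1 ∧
        (PySem.Int.mod ((i : Int) + off) n).toNat = j)
      ↔ min |(i : Int) - (j : Int)| (n - |(i : Int) - (j : Int)|) ≤ k := by
  have hn : 0 < n := by omega
  rw [min_le_iff, Int.abs_eq_natAbs]
  simp only [PySem.Int.mod_eq_emod_of_pos hn,
    PySem.Int.floordiv_eq_ediv_of_pos (show (0:Int) < 2 by norm_num)]
  have hka : min k (n / 2) ≤ k := min_le_left _ _
  have hkb : min k (n / 2) ≤ n / 2 := min_le_right _ _
  have hkc : min k (n / 2) = k ∨ min k (n / 2) = n / 2 := min_choice _ _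
  set kk := min k (n / 2) with hkk
  have hkn : 2 * kk ≤ n := by omega
  constructor
  · rintro ⟨off, h1, h2, h3⟩
    have hm0 : 0 ≤ ((i : Int) + off) % n := Int.emod_nonneg _ (by omega)
    have heq : ((i : Int) + off) % n = (j : Int) := by omega
    have hjj : (j : Int) % n = (j : Int) := Int.emod_eq_of_lt (by omega) (by omega)
    have hdvd : n ∣ ((i : Int) + off - j) := by
      apply Int.dvd_of_emod_eq_zero
      rw [Int.sub_emod, heq, hjj]
      simp
    obtain ⟨c, hc⟩ := hdvd
    have hc1 : -2 < c := by
      by_contra hcon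
      have hcon' : c ≤ -2 := by omega
      have hmul : n * c ≤ n * (-2) := mul_le_mul_of_nonneg_left hcon' (le_of_lt hn)
      omega
    have hc2 : c < 2 := by
      by_contra hcon
      have hcon' : 2 ≤ c := by omega
      have hmul : n * 2 ≤ n * c := mul_le_mul_of_nonneg_left hcon' (le_of_lt hn)
      omega
    interval_cases c <;> omega
  · intro h
    have key : (((i : Int) - j).natAbs : Int) ≤ kk ∨ n - (((i : Int) - j).natAbs : Int) ≤ kk := by
      rcases hkc with h' | h' <;> omega
    rcases key with key | key
    · refine ⟨(j : Int) - i, by omega, by omega, ?_⟩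
      rw [show ((i : Int) + ((j : Int) - i)) = (j : Int) by ring,
        Int.emod_eq_of_lt (by omega) (by omega)]
      omega
    · rcases lt_or_ge (j : Int) (i : Int) with hij | hij
      · refine ⟨(j : Int) - i + n, by omega, by omega, ?_⟩
        rw [show ((i : Int) + ((j : Int) - i + n)) = (j : Int) + n * 1 by ring,
          Int.add_mul_emod_self_left, Int.emod_eq_of_lt (by omega) (by omega)]
        omega
      · refine ⟨(j : Int) - i - n, by omega, by omega, ?_⟩
        rw [show ((i : Int) + ((j : Int) - i - n)) = (j : Int) + n * (-1) by ring,
          Int.add_mul_emod_self_left, Int.emod_eq_of_lt (by omega) (by omega)]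
        omega

theorem pre_trait_M_spec : Claim_equal_pre_trait_M := by
  intro n A k _ _
  unfold Spec_pre_trait_M pre_trait_M pre_trait_M_alt
  dsimp only
  rw [init_eq n]
  set N := n.toNat with hN
  congr 1
  -- M_dist component
  have hfA : ∀ (M : List (List Bool)) (a b : Int), RectN N M →
      a ∈ PySem.List.pyRange 1 (n+1) 1 → b ∈ PySem.List.pyRange 1 (n+1) 1 →
      (if min |a - b| (n - |a - b|) ≤ k then pySet2 M (a-1) (b-1) else M)
        = if decide (min |a - b| (n - |a - b|) ≤ k) then
            M.modify ((a-1).toNat) (fun r => r.set ((b-1).toNat) true) else M := by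
    intro M a b hM ha hb
    rw [PySem.List.mem_pyRange_one] at ha hb
    by_cases hc : min |a - b| (n - |a - b|) ≤ k
    · rw [if_pos hc, if_pos (by simpa using hc)]
      exact pySet2_eq N M (a-1) (b-1) hM (by omega) (by omega) (by omega) (by omega)
    · rw [if_neg hc, if_neg (by simpa using hc)]
  have hpqA : ∀ a ∈ PySem.List.pyRange 1 (n+1) 1, ∀ b ∈ PySem.List.pyRange 1 (n+1) 1,
      decide (min |a - b| (n - |a - b|) ≤ k) = true → (a-1).toNat < N ∧ (b-1).toNat < N := by
    intro a ha b hb _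
    rw [PySem.List.mem_pyRange_one] at ha hb
    omega
  have hA := get2_foldl2 N (PySem.List.pyRange 1 (n+1) 1) (PySem.List.pyRange 1 (n+1) 1)
    (fun M a b => if min |a - b| (n - |a - b|) ≤ k then pySet2 M (a-1) (b-1) else M)
    (fun a b => decide (min |a - b| (n - |a - b|) ≤ k))
    (fun a b => (a-1).toNat) (fun a b => (b-1).toNat)
    hfA hpqA (List.replicate N (List.replicate N false)) (rect_replicate N)
  have hfB : ∀ (M : List (List Bool)) (a off : Int), RectN N M →
      a ∈ PySem.List.pyRange 0 n 1 →
      off ∈ PySem.List.pyRange (-(min k (PySem.Int.floordiv n 2))) (min k (PySem.Int.floordiv n 2) + 1) 1 →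
      pySet2 M a (PySem.Int.mod (a + off) n)
        = if true then M.modify a.toNat (fun r => r.set ((PySem.Int.mod (a + off) n).toNat) true) else M := by
    intro M a off hM ha hoff
    rw [PySem.List.mem_pyRange_one] at ha
    have hn : 0 < n := by omega
    have hm1 : 0 ≤ PySem.Int.mod (a + off) n := by
      rw [PySem.Int.mod_eq_emod_of_pos hn]; exact Int.emod_nonneg _ (by omega)
    have hm2 : PySem.Int.mod (a + off) n < (N : Int) := by
      rw [PySem.Int.mod_eq_emod_of_pos hn]
      have := Int.emod_lt_of_pos (a + off) hn
      omega
    rw [if_pos rfl]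
    exact pySet2_eq N M a _ hM ha.1 (by omega) hm1 hm2
  have hpqB : ∀ a ∈ PySem.List.pyRange 0 n 1,
      ∀ off ∈ PySem.List.pyRange (-(min k (PySem.Int.floordiv n 2))) (min k (PySem.Int.floordiv n 2) + 1) 1,
      (true = true) → a.toNat < N ∧ (PySem.Int.mod (a + off) n).toNat < N := by
    intro a ha off hoff _
    rw [PySem.List.mem_pyRange_one] at ha
    have hn : 0 < n := by omega
    have hm1 : 0 ≤ PySem.Int.mod (a + off) n := by
      rw [PySem.Int.mod_eq_emod_of_pos hn]; exact Int.emod_nonneg _ (by omega)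
    have hm2 : PySem.Int.mod (a + off) n < n := by
      rw [PySem.Int.mod_eq_emod_of_pos hn]; exact Int.emod_lt_of_pos _ hn
    omega
  have hB := get2_foldl2 N (PySem.List.pyRange 0 n 1)
    (PySem.List.pyRange (-(min k (PySem.Int.floordiv n 2))) (min k (PySem.Int.floordiv n 2) + 1) 1)
    (fun M a off => pySet2 M a (PySem.Int.mod (a + off) n))
    (fun _ _ => true) (fun a off => a.toNat) (fun a off => (PySem.Int.mod (a + off) n).toNat)
    hfB hpqB (List.replicate N (List.replicate N false)) (rect_replicate N)
  apply matrix_ext N _ _ hA.1 hB.1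
  intro i j hi hj
  rw [hA.2 i j, hB.2 i j, get2_replicate, Bool.or_false, Bool.or_false]
  rw [Bool.eq_iff_iff]
  simp only [List.any_eq_true, PySem.List.mem_pyRange_one, Bool.and_eq_true,
    decide_eq_true_eq, beq_iff_eq, true_and]
  constructor
  · rintro ⟨a, ⟨ha1, ha2⟩, b, ⟨hb1, hb2⟩, ⟨hcond, hpa⟩, hqb⟩
    have ha' : a = (i : Int) + 1 := by omega
    have hb' : b = (j : Int) + 1 := by omega
    rw [ha', hb', show ((i : Int) + 1 - ((j : Int) + 1)) = (i : Int) - j by ring] at hcond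
    obtain ⟨off, h1, h2, h3⟩ := (band_iff n k i j (by omega) (by omega)).mpr hcond
    exact ⟨(i : Int), ⟨by omega, by omega⟩, off, ⟨h1, h2⟩, by omega, by simpa using h3⟩
  · rintro ⟨a, ⟨ha1, ha2⟩, off, ⟨ho1, ho2⟩, hai, hmj⟩
    have ha' : a = (i : Int) := by omega
    rw [ha'] at hmj
    have hcond := (band_iff n k i j (by omega) (by omega)).mp ⟨off, ho1, ho2, by simpa using hmj⟩
    refine ⟨(i : Int) + 1, ⟨by omega, by omega⟩, (j : Int) + 1, ⟨by omega, by omega⟩,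
      ⟨by rwa [show ((i : Int) + 1 - ((j : Int) + 1)) = (i : Int) - j by ring], by omega⟩, by omega⟩
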